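-- pv_equiv track=rewrite | github.com/abollu779/control-tasks | control-tasks/ptb_data.py | generate_lines_for_sent
-- ===== SOURCE A (Python) =====
-- def generate_lines_for_sent(lines):
--   buf = []
--   for line in lines:
--     if not line.strip(): # Encounted newline
--       if buf:
--         yield buf
--         buf = []
--       else:
--         continue
--     else:
--       buf.append(line.strip())
--   if buf:
--     yield buf
-- ===== SOURCE B (Python) =====
-- from itertools import groupby
--
-- def generate_lines_for_sent(lines):
--     for key, group in groupby(lines, key=lambda l: bool(l.strip())):
--         if key:
--             yield [l.strip() for l in group]
-- ===== Notes on version B (the rewrite author's own statement) =====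
-- stated objective: idiomatic
-- what changed: Replaces the manual buffer/flush state machine with itertools.groupby on the blank/non-blank key, yielding the stripped lines of each non-blank run.
import Mathlib
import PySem

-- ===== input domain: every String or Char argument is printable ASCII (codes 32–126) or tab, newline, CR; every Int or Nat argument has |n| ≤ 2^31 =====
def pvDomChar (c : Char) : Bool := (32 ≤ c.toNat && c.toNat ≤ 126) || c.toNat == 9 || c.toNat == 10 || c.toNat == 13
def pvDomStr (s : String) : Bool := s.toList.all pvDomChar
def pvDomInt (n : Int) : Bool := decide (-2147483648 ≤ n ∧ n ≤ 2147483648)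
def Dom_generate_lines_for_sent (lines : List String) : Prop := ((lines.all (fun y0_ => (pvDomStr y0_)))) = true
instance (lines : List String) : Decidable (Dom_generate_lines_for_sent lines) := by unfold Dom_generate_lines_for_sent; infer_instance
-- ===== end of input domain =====

-- B replaces A's manual buffer/flush loop with groupby-style run grouping; equivalence is about the sequence of yielded values.

-- ===== PORT A =====
-- the generator loop: out = values yielded so far, buf = current buffer
def genA (out : List (List String)) (buf : List String) : List String → List (List String)
  | [] => if buf = [] then out else out ++ [buf]
  | l :: ls =>
    if PySem.Str.strip l = "" then
      if buf = [] then genA out buf ls            -- continue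
      else genA (out ++ [buf]) [] ls              -- yield buf; buf = []
    else genA out (buf ++ [PySem.Str.strip l]) ls -- buf.append(line.strip())

def generate_lines_for_sent (lines : List String) : List (List String) := genA [] [] lines

-- ===== PORT B =====
-- groupby(lines, key = bool(l.strip())): maximal runs of lines with equal key, in order
def groupRuns : List String → List (Bool × List String)
  | [] => []
  | l :: ls =>
    let k : Bool := decide (PySem.Str.strip l ≠ "")
    match groupRuns ls with
    | (k', gr) :: rest => if k = k' then (k, l :: gr) :: rest else (k, [l]) :: (k', gr) :: rest
    | [] => [(k, [l])]

def generate_lines_for_sent_alt (lines : List String) : List (List String) :=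
  (groupRuns lines).filterMap (fun kg => if kg.1 then some (kg.2.map PySem.Str.strip) else none)

-- ===== PRECONDITION & SPEC =====
def Spec_generate_lines_for_sent (lines : List String) (out : List (List String)) : Prop := out = generate_lines_for_sent_alt lines
instance (lines : List String) (out : List (List String)) : Decidable (Spec_generate_lines_for_sent lines out) := by unfold Spec_generate_lines_for_sent; infer_instance

-- ===== CLAIM (what is proved, stated in full; the proofs are below) =====
def Claim_equal_generate_lines_for_sent : Prop := ∀ (lines : List String), Dom_generate_lines_for_sent lines → Spec_generate_lines_for_sent lines (generate_lines_for_sent lines)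

-- ===== LEMMAS AND PROOFS =====
def pvF (gs : List (Bool × List String)) : List (List String) :=
  gs.filterMap (fun kg => if kg.1 then some (kg.2.map PySem.Str.strip) else none)

lemma genA_accum : ∀ (ls : List String) (out : List (List String)) (buf : List String),
    genA out buf ls = out ++ genA [] buf ls := by
  intro ls
  induction ls with
  | nil => intro out buf; simp [genA]; split <;> simp
  | cons l ls ih =>
    intro out buf
    simp only [genA]
    split
    · split
      · exact ih out buf
      · rw [ih (out ++ [buf]) [], ih ([] ++ [buf]) []]; simp
    · exact ih out _

-- the central invariant: A's loop from buffer `buf` equals `buf` merged with B's run decomposition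
lemma genA_groupRuns : ∀ (ls : List String) (buf : List String),
    genA [] buf ls =
      (match groupRuns ls with
       | (true, gr) :: rest => (buf ++ gr.map PySem.Str.strip) :: pvF rest
       | gs => (if buf = [] then [] else [buf]) ++ pvF gs) := by
  intro ls
  induction ls with
  | nil => intro buf; cases buf <;> simp [genA, groupRuns, pvF]
  | cons l ls ih =>
    intro buf
    simp only [genA, groupRuns]
    by_cases hl : PySem.Str.strip l = ""
    · have key : (decide (PySem.Str.strip l ≠ "")) = false := by simp [hl]
      rw [if_pos hl]
      have hA : (if buf = [] then genA [] buf ls else genA ([] ++ [buf]) [] ls)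
              = (if buf = [] then [] else [buf]) ++ genA [] [] ls := by
        split
        · simp_all
        · rw [genA_accum]; simp
      rw [hA, ih []]
      cases hg : groupRuns ls with
      | nil => simp [key, pvF]
      | cons p rest =>
        obtain ⟨k', gr⟩ := p
        cases k' <;> simp [key, pvF]
    · have key : (decide (PySem.Str.strip l ≠ "")) = true := by simp [hl]
      rw [if_neg hl, ih (buf ++ [PySem.Str.strip l])]
      cases hg : groupRuns ls with
      | nil => simp [key, pvF]
      | cons p rest =>
        obtain ⟨k', gr⟩ := p
        cases k' <;> simp [key, pvF]

lemma alt_eq_g : ∀ (lines : List String), generate_lines_for_sent lines = generate_lines_for_sent_alt lines := by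
  intro lines
  unfold generate_lines_for_sent generate_lines_for_sent_alt
  rw [genA_groupRuns]
  cases hg : groupRuns lines with
  | nil => simp [pvF]
  | cons p rest =>
    obtain ⟨k', gr⟩ := p
    cases k' <;> simp [pvF]

-- ===== VERDICT (by name: the statement is the Claim_ definition above) =====
theorem generate_lines_for_sent_spec : Claim_equal_generate_lines_for_sent := by
  intro lines _
  unfold Spec_generate_lines_for_sent
  exact alt_eq_g lines
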